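-- pv_equiv track=rewrite | github.com/nmp4817/ALGORITHMS | Python/MIT 6.006 Fall 2011/doc_distance.py | doc_to_words_list
-- ===== SOURCE A (Python) =====
-- def doc_to_words_list(doc):
-- 	# list_of_words = re.findall(r"\w+",doc)           # in general, re takes exponential time
--
-- 	list_of_words = []
-- 	word = ""
--
-- 	for char in doc:                                   # O(len(doc)) = linear time
-- 		if char.isalpha():
-- 			word += char
-- 		elif len(word) > 0:
-- 			list_of_words.append(word)
-- 			word = ""
--
-- 	if len(word) > 0:
-- 		list_of_words.append(word)
--
-- 	return list_of_words
-- ===== SOURCE B (Python) =====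
-- from itertools import groupby
--
--
-- def doc_to_words_list(doc):
--     # group consecutive characters by whether they are alphabetic;
--     # keep exactly the alphabetic runs, joined back into words
--     return [''.join(g) for k, g in groupby(doc, str.isalpha) if k]
-- ===== Notes on version B (the rewrite author's own statement) =====
-- stated objective: idiomatic
-- what changed: Replaces the manual accumulate-and-flush loop (explicit word buffer, two flush sites) with itertools.groupby keyed on str.isalpha: consecutive runs are grouped once and the alphabetic runs are joined and kept in one comprehension.
import Mathlib
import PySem

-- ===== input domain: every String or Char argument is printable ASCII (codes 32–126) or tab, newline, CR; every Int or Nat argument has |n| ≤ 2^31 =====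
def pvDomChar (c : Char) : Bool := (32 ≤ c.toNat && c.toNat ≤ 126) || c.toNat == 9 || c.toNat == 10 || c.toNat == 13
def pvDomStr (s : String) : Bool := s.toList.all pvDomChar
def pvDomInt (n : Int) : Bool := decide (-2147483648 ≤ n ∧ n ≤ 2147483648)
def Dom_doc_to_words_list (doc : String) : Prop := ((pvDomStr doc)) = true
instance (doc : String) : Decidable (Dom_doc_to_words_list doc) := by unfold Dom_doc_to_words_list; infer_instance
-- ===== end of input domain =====

-- B replaces A's accumulate-and-flush loop with a groupby-on-isalpha decomposition (idiomatic; same cost).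

-- ===== PORT A =====
-- the loop body: append alphabetic chars to the current word, flush the word on a non-letter
def pvStepA (st : List String × List Char) (c : Char) : List String × List Char :=
  if PySem.Chars.isalpha c then (st.1, st.2 ++ [c])
  else if st.2.length > 0 then (st.1 ++ [String.ofList st.2], []) else st

def doc_to_words_list (doc : String) : List String :=
  let st := doc.toList.foldl pvStepA ([], [])
  if st.2.length > 0 then st.1 ++ [String.ofList st.2] else st.1

-- ===== PORT B =====
-- itertools.groupby(doc, str.isalpha): consecutive runs with their key
def pvRuns (l : List Char) : List (Bool × List Char) :=
  match l with
  | [] => []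
  | c :: cs =>
    let p := cs.span (fun d => PySem.Chars.isalpha d == PySem.Chars.isalpha c)
    (PySem.Chars.isalpha c, c :: p.1) :: pvRuns p.2
termination_by l.length
decreasing_by
  simp only [List.span_eq_takeWhile_dropWhile, List.length_cons]
  exact Nat.lt_succ_of_le (List.Sublist.length_le (List.dropWhile_sublist _))

-- [''.join(g) for k, g in groupby(doc, str.isalpha) if k]
def doc_to_words_list_alt (doc : String) : List String :=
  ((pvRuns doc.toList).filter (·.1)).map (fun g => String.ofList g.2)

-- ===== PRECONDITION & SPEC =====
def Spec_doc_to_words_list (doc : String) (out : List String) : Prop := out = doc_to_words_list_alt doc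
instance (doc : String) (out : List String) : Decidable (Spec_doc_to_words_list doc out) := by unfold Spec_doc_to_words_list; infer_instance

-- ===== CLAIM (what is proved, stated in full; the proofs are below) =====
def Claim_equal_doc_to_words_list : Prop := ∀ (doc : String), Dom_doc_to_words_list doc → Spec_doc_to_words_list doc (doc_to_words_list doc)

-- ===== LEMMAS AND PROOFS =====

-- common reference: the words of `cs` given the pending word `w`
def pvCore : List Char → List Char → List String
  | w, [] => if w.length > 0 then [String.ofList w] else []
  | w, c :: cs =>
    if PySem.Chars.isalpha c then pvCore (w ++ [c]) cs
    else if w.length > 0 then String.ofList w :: pvCore [] cs else pvCore [] cs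

-- A's fold, finished, computes pvCore
theorem pvFoldA (cs : List Char) : ∀ (ws : List String) (w : List Char),
    (let st := cs.foldl pvStepA (ws, w)
     if st.2.length > 0 then st.1 ++ [String.ofList st.2] else st.1) = ws ++ pvCore w cs := by
  induction cs with
  | nil =>
    intro ws w
    simp only [List.foldl_nil, pvCore]
    split <;> simp
  | cons c cs ih =>
    intro ws w
    simp only [List.foldl_cons, pvCore, pvStepA]
    by_cases h : PySem.Chars.isalpha c = true
    · simp only [h, if_pos trivial]
      exact ih ws (w ++ [c])
    · have hcf : PySem.Chars.isalpha c = false := eq_false_of_ne_true h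
      simp only [hcf, Bool.false_eq_true, if_false]
      by_cases hw : w.length > 0
      · simp only [hw, ite_true]
        rw [ih (ws ++ [String.ofList w]) []]
        simp
      · simp only [hw, ite_false]
        have : w = [] := by
          cases w with
          | nil => rfl
          | cons a t => simp at hw
        rw [this]
        exact ih ws []

-- consuming an all-alphabetic run extends the pending word
theorem pvCore_run_true : ∀ (run : List Char), (∀ d ∈ run, PySem.Chars.isalpha d = true) →
    ∀ (w rest : List Char), pvCore w (run ++ rest) = pvCore (w ++ run) rest := by
  intro run
  induction run with
  | nil => intro _ w rest; simp
  | cons c t ih =>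
    intro h w rest
    have hc : PySem.Chars.isalpha c = true := h c (List.mem_cons_self ..)
    simp only [List.cons_append, pvCore, hc, ite_true]
    rw [ih (fun d hd => h d (List.mem_cons_of_mem _ hd)) (w ++ [c]) rest]
    simp

-- consuming an all-non-alphabetic run with no pending word is a no-op
theorem pvCore_run_false : ∀ (run : List Char), (∀ d ∈ run, PySem.Chars.isalpha d = false) →
    ∀ (rest : List Char), pvCore [] (run ++ rest) = pvCore [] rest := by
  intro run
  induction run with
  | nil => intro _ rest; simp
  | cons c t ih =>
    intro h rest
    have hc : PySem.Chars.isalpha c = false := h c (List.mem_cons_self ..)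
    simp only [List.cons_append, pvCore, hc]
    exact ih (fun d hd => h d (List.mem_cons_of_mem _ hd)) rest

-- a nonempty pending word flushes when the next char (if any) is not a letter
theorem pvCore_flush (w rest : List Char) (hw : w ≠ [])
    (hrest : match rest with | [] => True | d :: _ => PySem.Chars.isalpha d = false) :
    pvCore w rest = String.ofList w :: pvCore [] rest := by
  have hwl : w.length > 0 := by cases w with | nil => exact absurd rfl hw | cons a t => simp
  cases rest with
  | nil => simp [pvCore, hwl]
  | cons d r =>
    have hd : PySem.Chars.isalpha d = false := hrest
    simp [pvCore, hd, hwl]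

-- pvCore with empty pending word equals B's groupby pipeline (strong induction on length)
theorem pvCore_eq_alt (n : Nat) : ∀ cs : List Char, cs.length ≤ n →
    pvCore [] cs = ((pvRuns cs).filter (·.1)).map (fun g => String.ofList g.2) := by
  induction n with
  | zero =>
    intro cs h
    have : cs = [] := List.length_eq_zero_iff.mp (Nat.le_zero.mp h)
    simp [this, pvCore, pvRuns]
  | succ n ih =>
    intro cs h
    cases cs with
    | nil => simp [pvCore, pvRuns]
    | cons c cs' =>
      have hsplit : cs'.takeWhile (fun d => PySem.Chars.isalpha d == PySem.Chars.isalpha c) ++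
          cs'.dropWhile (fun d => PySem.Chars.isalpha d == PySem.Chars.isalpha c) = cs' :=
        List.takeWhile_append_dropWhile
      set run := cs'.takeWhile (fun d => PySem.Chars.isalpha d == PySem.Chars.isalpha c) with hrun
      set rest := cs'.dropWhile (fun d => PySem.Chars.isalpha d == PySem.Chars.isalpha c) with hrest
      have hrunmem : ∀ d ∈ run, PySem.Chars.isalpha d = PySem.Chars.isalpha c := by
        intro d hd
        have := List.mem_takeWhile_imp (hrun ▸ hd)
        exact eq_of_beq this
      have hrestlen : rest.length ≤ cs'.length :=
        List.Sublist.length_le (hrest ▸ List.dropWhile_sublist _)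
      have hih : pvCore [] rest = ((pvRuns rest).filter (·.1)).map (fun g => String.ofList g.2) :=
        ih rest (le_trans hrestlen (Nat.le_of_succ_le_succ h))
      have hresthd : match rest with
          | [] => True
          | d :: _ => (PySem.Chars.isalpha d == PySem.Chars.isalpha c) = false := by
        cases hr : rest with
        | nil => trivial
        | cons d r =>
          have := List.head?_dropWhile_not (fun d => PySem.Chars.isalpha d == PySem.Chars.isalpha c) cs'
          rw [← hrest, hr] at this
          simpa using this
      have hruns : pvRuns (c :: cs') = (PySem.Chars.isalpha c, c :: run) :: pvRuns rest := by
        rw [pvRuns]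
        simp [List.span_eq_takeWhile_dropWhile, ← hrun, ← hrest]
      by_cases hc : PySem.Chars.isalpha c = true
      · have hstep : pvCore [] (c :: cs') = pvCore [c] cs' := by simp [pvCore, hc]
        rw [hruns, hstep]
        conv_lhs => rw [← hsplit]
        rw [pvCore_run_true run (fun d hd => (hrunmem d hd).trans hc) [c] rest,
          List.singleton_append]
        rw [pvCore_flush (c :: run) rest (by simp)
          (by cases hr : rest with
              | nil => trivial
              | cons d r =>
                have := hresthd; rw [hr] at this
                simp only [hc] at this
                simpa using this)]
        rw [hih]
        simp [hc]
      · have hcf : PySem.Chars.isalpha c = false := eq_false_of_ne_true hc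
        have hstep : pvCore [] (c :: cs') = pvCore [] cs' := by simp [pvCore, hcf]
        rw [hruns, hstep]
        conv_lhs => rw [← hsplit]
        rw [pvCore_run_false run (fun d hd => (hrunmem d hd).trans hcf) rest, hih]
        simp [hcf]

-- ===== VERDICT (by name: the statement is the Claim_ definition above) =====
theorem doc_to_words_list_spec : Claim_equal_doc_to_words_list := by
  intro doc _
  unfold Spec_doc_to_words_list doc_to_words_list doc_to_words_list_alt
  rw [pvFoldA doc.toList [] []]
  simpa using pvCore_eq_alt doc.toList.length doc.toList le_rfl
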